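-- pv_equiv track=rewrite | github.com/daniel-reich/ubiquitous-fiesta | XKSwuu4ddzBvkXjvf_3.py | sentence_primeness
-- ===== SOURCE A (Python) =====
-- def sentence_primeness(txt):
--   d={str(i):i for i in range(10)}
--   d.update({chr(65+i):i+1 for i in range(26)})
--   d.update({chr(97+i):i+1 for i in range(26)})
--   txt=''.join(i if i.isalnum() else ' ' for i in txt).split()
--   val=[sum(d[i] for i in word) for word in txt]
--   sval=sum(val)
--   if isprime(sval):return "Prime Sentence"
--   for a,b in zip(txt,val):
--     if isprime(sval-b):return 'Almost Prime Sentence ({})'.format(a)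
--   return "Composite Sentence"
--
-- def isprime(num):
--   return num>1 and all([num%i for i in range(2,num//2+1)])
-- ===== SOURCE B (Python) =====
-- def sentence_primeness(txt):
--   words = ''.join(c if c.isalnum() else ' ' for c in txt).split()
--   vals = [sum(_charval(c) for c in w) for w in words]
--   sval = sum(vals)
--   # sieve of Eratosthenes: mark every composite up to sval once (byte flags,
--   # marking multiples of each p from p*p); each primality query is then one lookup
--   comp = bytearray(sval + 1)
--   p = 2
--   while p * p <= sval:
--     comp[p * p::p] = b'\x01' * ((sval - p * p) // p + 1)
--     p += 1
--   if sval > 1 and not comp[sval]: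
--     return "Prime Sentence"
--   for w, b in zip(words, vals):
--     x = sval - b
--     if x > 1 and not comp[x]:
--       return 'Almost Prime Sentence ({})'.format(w)
--   return "Composite Sentence"
--
-- def _charval(c):
--   return ord(c) - 48 if c.isdigit() else ord(c.lower()) - 96
-- ===== Notes on version B (the rewrite author's own statement) =====
-- stated objective: alternative
-- what changed: B precomputes one sieve of Eratosthenes (byte flags, multiples marked from p*p) over all numbers up to the sentence total and answers every primality query with a single lookup, and scores characters arithmetically from their char codes instead of building A's 62-entry dict; A trial-divides up to n//2 on every query.
import Mathlib
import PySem

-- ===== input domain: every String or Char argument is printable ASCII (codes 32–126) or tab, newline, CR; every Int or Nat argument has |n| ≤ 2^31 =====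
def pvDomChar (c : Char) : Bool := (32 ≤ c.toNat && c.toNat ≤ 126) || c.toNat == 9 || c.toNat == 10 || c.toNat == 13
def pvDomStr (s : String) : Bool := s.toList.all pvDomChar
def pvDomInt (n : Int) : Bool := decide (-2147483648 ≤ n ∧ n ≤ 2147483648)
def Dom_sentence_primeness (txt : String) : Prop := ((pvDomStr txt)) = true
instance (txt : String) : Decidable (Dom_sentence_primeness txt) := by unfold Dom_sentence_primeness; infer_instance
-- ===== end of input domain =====

-- B replaces A's per-query trial-division isprime with one precomputed sieve set of
-- composites up to sval and A's letter dict with an arithmetic char value (alternative, not measured faster).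

-- ===== PORT A =====

-- isprime(num): num>1 and all([num%i for i in range(2,num//2+1)])  (element truthy ↔ num%i ≠ 0)
def pvIsprime (num : Int) : Bool :=
  decide (num > 1) && (PySem.List.pyRange 2 (PySem.Int.floordiv num 2 + 1)).all
    (fun i => !(PySem.Int.mod num i == 0))

-- d = {str(i):i} ∪ {chr(65+i):i+1} ∪ {chr(97+i):i+1}; keys are 1-char strings → Char
def pvDictA : PySem.Dict Char Int :=
  let d := (PySem.List.pyRange 0 10).foldl
    (fun d i => d.insert (Char.ofNat (48 + i).toNat) i) PySem.Dict.empty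
  let d := (PySem.List.pyRange 0 26).foldl
    (fun d i => d.insert (Char.ofNat (65 + i).toNat) (i + 1)) d
  (PySem.List.pyRange 0 26).foldl
    (fun d i => d.insert (Char.ofNat (97 + i).toNat) (i + 1)) d

-- for a,b in zip(txt,val): first word with isprime(sval-b)
def pvLoopA (sval : Int) : List (List Char × Int) → String
  | [] => "Composite Sentence"
  | (a, b) :: t =>
      if pvIsprime (sval - b) then "Almost Prime Sentence (" ++ String.ofList a ++ ")"
      else pvLoopA sval t

def sentence_primeness (txt : String) : String :=
  let words := PySem.Chars.split₀ (txt.toList.map (fun c => if PySem.Chars.isalnum c then c else ' '))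
  -- d[i]: KeyError impossible — every char of a split word is ASCII alphanumeric, hence a key of d
  let val := words.map (fun w => (w.map (fun c => pvDictA.getD c 0)).sum)
  let sval := val.sum
  if pvIsprime sval then "Prime Sentence"
  else pvLoopA sval (words.zip val)

-- ===== PORT B =====

-- _charval(c) = ord(c)-48 if c.isdigit() else ord(c.lower())-96
def pvCharval (c : Char) : Int :=
  if PySem.Chars.isdigit c then (c.toNat : Int) - 48 else ((PySem.Chars.lowerChar c).toNat : Int) - 96

-- while p*p <= sval: mark range(p*p, sval+1, p); the bytearray of 0/1 flags is
-- ported as the set of marked (composite) indices, exact for the lookups made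
def pvSieveGo (sval p : Int) (s : PySem.Set Int) : PySem.Set Int :=
  if h : p * p <= sval then
    pvSieveGo sval (p + 1) ((PySem.List.pyRange (p * p) (sval + 1) p).foldl (fun s m => s.add m) s)
  else s
termination_by (sval + 1 - p).toNat
decreasing_by
  have hp : p ≤ sval := by
    rcases (by omega : p ≤ 0 ∨ 0 < p) with h0 | h0
    · have := mul_self_nonneg p
      omega
    · have : p * 1 ≤ p * p := by
        exact mul_le_mul_of_nonneg_left (by omega) (by omega)
      omega
  omega

-- comp = bytearray flags; comp[x] == 1 ↔ x ∈ pvComposites sval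
def pvComposites (sval : Int) : PySem.Set Int := pvSieveGo sval 2 PySem.Set.empty

def pvLoopB (sval : Int) (comp : PySem.Set Int) : List (List Char × Int) → String
  | [] => "Composite Sentence"
  | (w, b) :: t =>
      let x := sval - b
      if decide (x > 1) && !(comp.contains x) then "Almost Prime Sentence (" ++ String.ofList w ++ ")"
      else pvLoopB sval comp t

def sentence_primeness_alt (txt : String) : String :=
  let words := PySem.Chars.split₀ (txt.toList.map (fun c => if PySem.Chars.isalnum c then c else ' '))
  let vals := words.map (fun w => (w.map pvCharval).sum)
  let sval := vals.sum
  let comp := pvComposites sval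
  if decide (sval > 1) && !(comp.contains sval) then "Prime Sentence"
  else pvLoopB sval comp (words.zip vals)

-- ===== PRECONDITION & SPEC =====
def Spec_sentence_primeness (txt : String) (out : String) : Prop := out = sentence_primeness_alt txt
instance (txt : String) (out : String) : Decidable (Spec_sentence_primeness txt out) := by unfold Spec_sentence_primeness; infer_instance

-- ===== CLAIM (what is proved, stated in full; the proofs are below) =====
def Claim_equal_sentence_primeness : Prop := ∀ (txt : String), Dom_sentence_primeness txt → Spec_sentence_primeness txt (sentence_primeness txt)

-- ===== LEMMAS AND PROOFS =====

-- every char of every word produced by split₀ satisfies P, given P on the non-space source chars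
theorem pv_split0_go_chars (P : Char → Prop) :
    ∀ (s cur : List Char) (acc : List (List Char)),
      (∀ c ∈ s, PySem.Chars.isspace c = false → P c) →
      (∀ c ∈ cur, P c) →
      (∀ w ∈ acc, ∀ c ∈ w, P c) →
      ∀ w ∈ PySem.Chars.split₀.go s cur acc, ∀ c ∈ w, P c := by
  intro s
  induction s with
  | nil =>
      intro cur acc hs hcur hacc w hw c hc
      rw [PySem.Chars.split₀.go.eq_def] at hw
      replace hw : w ∈ (if cur.isEmpty = true then acc.reverse
          else (cur.reverse :: acc).reverse) := hw
      by_cases h : cur.isEmpty = true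
      · rw [if_pos h] at hw
        exact hacc w (List.mem_reverse.mp hw) c hc
      · rw [if_neg h] at hw
        rcases List.mem_cons.mp (List.mem_reverse.mp hw) with hw2 | hw2
        · subst hw2
          exact hcur c (List.mem_reverse.mp hc)
        · exact hacc w hw2 c hc
  | cons a rest ih =>
      intro cur acc hs hcur hacc w hw c hc
      rw [PySem.Chars.split₀.go.eq_def] at hw
      replace hw : w ∈ (if PySem.Chars.isspace a = true then
            if cur.isEmpty = true then PySem.Chars.split₀.go rest [] acc
            else PySem.Chars.split₀.go rest [] (cur.reverse :: acc)
          else PySem.Chars.split₀.go rest (a :: cur) acc) := hw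
      by_cases hsp : PySem.Chars.isspace a = true
      · rw [if_pos hsp] at hw
        by_cases he : cur.isEmpty = true
        · rw [if_pos he] at hw
          exact ih [] acc (fun c hc => hs c (List.mem_cons_of_mem _ hc)) (by simp)
            hacc w hw c hc
        · rw [if_neg he] at hw
          refine ih [] (cur.reverse :: acc) (fun c hc => hs c (List.mem_cons_of_mem _ hc)) (by simp)
            ?_ w hw c hc
          intro w' hw' c' hc'
          rcases List.mem_cons.mp hw' with h | h
          · exact hcur c' (by simpa [h] using hc')
          · exact hacc w' h c' hc'
      · rw [if_neg hsp] at hw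
        refine ih (a :: cur) acc (fun c hc => hs c (List.mem_cons_of_mem _ hc)) ?_ hacc w hw c hc
        intro c' hc'
        rcases List.mem_cons.mp hc' with h | h
        · subst h
          exact hs _ List.mem_cons_self (by simpa using hsp)
        · exact hcur c' h

theorem pv_word_chars_alnum (xs : List Char) :
    ∀ w ∈ PySem.Chars.split₀ (xs.map (fun c => if PySem.Chars.isalnum c then c else ' ')),
      ∀ c ∈ w, PySem.Chars.isalnum c = true := by
  intro w hw c hc
  refine pv_split0_go_chars (fun c => PySem.Chars.isalnum c = true) _ [] [] ?_ (by simp) (by simp)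
    w hw c hc
  intro c' hc' hns
  rcases List.mem_map.mp hc' with ⟨a, _, ha⟩
  by_cases h : PySem.Chars.isalnum a = true
  · rw [← ha, if_pos h]
    exact h
  · exfalso
    rw [← ha] at hns
    simp [h, PySem.Chars.isspace] at hns

-- alnum chars have code < 123
theorem pv_alnum_lt (c : Char) (h : PySem.Chars.isalnum c = true) : c.toNat < 123 := by
  simp [PySem.Chars.isalnum, PySem.Chars.isalpha, PySem.Chars.isupper, PySem.Chars.islower,
    PySem.Chars.isdigit, Char.le_def, UInt32.le_iff_toNat_le] at h
  rcases h with (h | h) | h <;> omega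

-- on alphanumeric chars A's dict value equals B's arithmetic value, and it is nonnegative
set_option maxRecDepth 20000 in
theorem pv_value_eq_aux :
    ∀ n ∈ List.range 123,
      (PySem.Chars.isalnum (Char.ofNat n) = true →
        pvDictA.getD (Char.ofNat n) 0 = pvCharval (Char.ofNat n) ∧
          0 ≤ pvCharval (Char.ofNat n)) := by decide

theorem pv_value_eq (c : Char) (h : PySem.Chars.isalnum c = true) :
    pvDictA.getD c 0 = pvCharval c ∧ 0 ≤ pvCharval c := by
  have hb := pv_alnum_lt c h
  have := pv_value_eq_aux c.toNat (List.mem_range.mpr hb)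
  rw [Char.ofNat_toNat] at this
  exact this h

-- membership in the sieve set
theorem pv_mem_foldl_add (l : List Int) (s0 : PySem.Set Int) (x : Int) :
    x ∈ l.foldl (fun s m => s.add m) s0 ↔ x ∈ s0 ∨ x ∈ l := by
  induction l generalizing s0 with
  | nil => simp
  | cons a t ih =>
      simp only [List.foldl_cons, ih, PySem.Set.mem_add, List.mem_cons]
      tauto

theorem pv_sieve_mem (sval : Int) :
    ∀ (p : Int) (s : PySem.Set Int) (x : Int), 0 ≤ p →
      (x ∈ pvSieveGo sval p s ↔
        x ∈ s ∨ ∃ q, p ≤ q ∧ q * q ≤ sval ∧ x ∈ PySem.List.pyRange (q * q) (sval + 1) q) := by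
  intro p s x
  induction p, s using pvSieveGo.induct sval with
  | case1 p s h ih =>
      intro hp
      rw [pvSieveGo, dif_pos h, ih (by omega), pv_mem_foldl_add]
      constructor
      · rintro ((hs | hr) | ⟨q, hq1, hq2, hq3⟩)
        · exact Or.inl hs
        · exact Or.inr ⟨p, le_rfl, h, hr⟩
        · exact Or.inr ⟨q, by omega, hq2, hq3⟩
      · rintro (hs | ⟨q, hq1, hq2, hq3⟩)
        · exact Or.inl (Or.inl hs)
        · rcases eq_or_lt_of_le hq1 with rfl | hlt
          · exact Or.inl (Or.inr hq3)
          · exact Or.inr ⟨q, by omega, hq2, hq3⟩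
  | case2 p s h =>
      intro hp
      rw [pvSieveGo, dif_neg h]
      constructor
      · exact Or.inl
      · rintro (hs | ⟨q, hq1, hq2, _⟩)
        · exact hs
        · exfalso
          have : p * p ≤ q * q := mul_le_mul hq1 hq1 hp (by omega)
          omega

theorem pv_mem_composites (sval x : Int) :
    x ∈ pvComposites sval ↔
      ∃ q, 2 ≤ q ∧ q * q ≤ sval ∧ x ∈ PySem.List.pyRange (q * q) (sval + 1) q := by
  unfold pvComposites
  rw [pv_sieve_mem sval 2 PySem.Set.empty x (by omega), PySem.Set.empty_eq]
  simp only [List.not_mem_nil, false_or]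

-- x is in the sieve set iff it has a divisor p with 2 ≤ p and 2p ≤ x (for 0 ≤ x ≤ sval)
theorem pv_mem_composites_iff (sval x : Int) (_hx0 : 0 ≤ x) (hxs : x ≤ sval) :
    x ∈ pvComposites sval ↔ ∃ p, 2 ≤ p ∧ 2 * p ≤ x ∧ p ∣ x := by
  rw [pv_mem_composites]
  constructor
  · rintro ⟨q, h2, hqs, hx⟩
    have hq : (0 : Int) < q := by omega
    rcases (PySem.List.mem_pyRange_iff_of_pos hq x).mp hx with ⟨ha, _, hd⟩
    have hdvd : q ∣ x := by
      have : q ∣ q * q := Dvd.intro q rfl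
      simpa using dvd_add hd this
    refine ⟨q, h2, ?_, hdvd⟩
    have : 2 * q ≤ q * q := mul_le_mul_of_nonneg_right (by omega) (by omega)
    omega
  · rintro ⟨i, h2, hix, hd⟩
    obtain ⟨j, hj⟩ := hd
    have hi : (0 : Int) < i := by omega
    have hj2 : 2 ≤ j := by
      by_contra hcon
      have : i * j ≤ i * 1 := mul_le_mul_of_nonneg_left (by omega) (by omega)
      omega
    rcases le_total i j with hle | hle
    · refine ⟨i, h2, ?_, ?_⟩
      · have : i * i ≤ i * j := mul_le_mul_of_nonneg_left hle (by omega)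
        omega
      · refine (PySem.List.mem_pyRange_iff_of_pos hi x).mpr ⟨?_, by omega, ?_⟩
        · have : i * i ≤ i * j := mul_le_mul_of_nonneg_left hle (by omega)
          omega
        · exact dvd_sub ⟨j, hj⟩ (Dvd.intro i rfl)
    · rw [mul_comm] at hj
      refine ⟨j, hj2, ?_, ?_⟩
      · have : j * j ≤ j * i := mul_le_mul_of_nonneg_left hle (by omega)
        omega
      · have hjx : j ∣ x := ⟨i, hj⟩
        refine (PySem.List.mem_pyRange_iff_of_pos (by omega) x).mpr ⟨?_, by omega, ?_⟩
        · have : j * j ≤ j * i := mul_le_mul_of_nonneg_left hle (by omega)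
          omega
        · exact dvd_sub hjx (Dvd.intro j rfl)

-- A's trial-division test as a proposition
theorem pv_isprime_iff (x : Int) :
    pvIsprime x = true ↔ 1 < x ∧ ∀ i, 2 ≤ i → 2 * i ≤ x → ¬ i ∣ x := by
  unfold pvIsprime
  rw [Bool.and_eq_true, decide_eq_true_iff, List.all_eq_true]
  constructor
  · rintro ⟨h1, h2⟩
    refine ⟨h1, fun i hi2 hix hd => ?_⟩
    have hmem : i ∈ PySem.List.pyRange 2 (PySem.Int.floordiv x 2 + 1) := by
      refine PySem.List.mem_pyRange_one.mpr ⟨hi2, ?_⟩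
      have := (PySem.Int.le_floordiv_iff_mul_le (a := x) (b := 2) (q := i) (by omega)).mpr (by omega)
      omega
    have := h2 i hmem
    simp only [Bool.not_eq_eq_eq_not, Bool.not_true, beq_eq_false_iff_ne, ne_eq] at this
    exact this ((PySem.Int.mod_eq_zero_iff_dvd x i).mpr hd)
  · rintro ⟨h1, h2⟩
    refine ⟨h1, fun i hmem => ?_⟩
    rcases PySem.List.mem_pyRange_one.mp hmem with ⟨hi2, hiu⟩
    have hix : 2 * i ≤ x := by
      have := (PySem.Int.le_floordiv_iff_mul_le (a := x) (b := 2) (q := i) (by omega)).mp (by omega)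
      omega
    have := h2 i hi2 hix
    simp only [Bool.not_eq_eq_eq_not, Bool.not_true, beq_eq_false_iff_ne, ne_eq]
    intro hmod
    exact this ((PySem.Int.mod_eq_zero_iff_dvd x i).mp hmod)

-- the two primality tests agree for 0 ≤ x ≤ sval
theorem pv_prime_eq (sval x : Int) (hx0 : 0 ≤ x) (hxs : x ≤ sval) :
    pvIsprime x = (decide (x > 1) && !((pvComposites sval).contains x)) := by
  have hmem : ((pvComposites sval).contains x = true) ↔ x ∈ pvComposites sval :=
    PySem.Set.contains_iff _ _
  by_cases h1 : 1 < x
  · by_cases hin : x ∈ pvComposites sval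
    · have hc : (pvComposites sval).contains x = true := hmem.mpr hin
      rw [hc]
      simp only [Bool.not_true, Bool.and_false]
      rw [← Bool.not_eq_true, pv_isprime_iff]
      rcases (pv_mem_composites_iff sval x hx0 hxs).mp hin with ⟨p, hp2, hpx, hpd⟩
      rintro ⟨_, hall⟩
      exact hall p hp2 hpx hpd
    · have hc : (pvComposites sval).contains x = false := by
        rw [← Bool.not_eq_true]
        intro h
        exact hin (hmem.mp h)
      rw [hc]
      simp only [Bool.not_false, Bool.and_true, gt_iff_lt, h1, decide_true]
      exact (pv_isprime_iff x).mpr ⟨h1, fun i hi2 hix hd =>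
        hin ((pv_mem_composites_iff sval x hx0 hxs).mpr ⟨i, hi2, hix, hd⟩)⟩
  · have hA : pvIsprime x = false := by
      unfold pvIsprime
      simp [show ¬ (1 : Int) < x from h1]
    rw [hA]
    simp [show ¬ x > 1 from h1]

-- the two result loops agree when the primality tests agree on every entry
theorem pv_loop_eq (sval : Int) (comp : PySem.Set Int) :
    ∀ l : List (List Char × Int),
      (∀ p ∈ l, pvIsprime (sval - p.2) = (decide (sval - p.2 > 1) && !(comp.contains (sval - p.2)))) →
      pvLoopA sval l = pvLoopB sval comp l := by
  intro l
  induction l with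
  | nil => intro _; rfl
  | cons a t ih =>
      intro h
      obtain ⟨w, b⟩ := a
      have ha := h (w, b) List.mem_cons_self
      simp only [pvLoopA, pvLoopB, ha]
      by_cases hb : (decide (sval - b > 1) && !(comp.contains (sval - b))) = true
      · rw [if_pos hb, if_pos hb]
      · rw [if_neg hb, if_neg hb]
        exact ih (fun p hp => h p (List.mem_cons_of_mem _ hp))

-- the two bodies agree for any word list whose chars are all alphanumeric
theorem pv_main (W : List (List Char))
    (hW : ∀ w ∈ W, ∀ c ∈ w, PySem.Chars.isalnum c = true) :
    (if pvIsprime ((W.map (fun w => (w.map (fun c => pvDictA.getD c 0)).sum)).sum) then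
      "Prime Sentence"
    else pvLoopA ((W.map (fun w => (w.map (fun c => pvDictA.getD c 0)).sum)).sum)
      (W.zip (W.map (fun w => (w.map (fun c => pvDictA.getD c 0)).sum))))
    = (if (decide ((W.map (fun w => (w.map pvCharval).sum)).sum > 1) &&
          !((pvComposites ((W.map (fun w => (w.map pvCharval).sum)).sum)).contains
            ((W.map (fun w => (w.map pvCharval).sum)).sum))) then
      "Prime Sentence"
    else pvLoopB ((W.map (fun w => (w.map pvCharval).sum)).sum)
      (pvComposites ((W.map (fun w => (w.map pvCharval).sum)).sum))
      (W.zip (W.map (fun w => (w.map pvCharval).sum)))) := by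
  have hval : W.map (fun w => (w.map (fun c => pvDictA.getD c 0)).sum)
      = W.map (fun w => (w.map pvCharval).sum) := by
    refine List.map_congr_left (fun w hw => ?_)
    exact congrArg List.sum
      (List.map_congr_left (fun c hc => (pv_value_eq c (hW w hw c hc)).1))
  rw [hval]
  set vals := W.map (fun w => (w.map pvCharval).sum) with hvals
  set sval := vals.sum with hsval
  have hnn : ∀ b ∈ vals, 0 ≤ b := by
    intro b hb
    rcases List.mem_map.mp hb with ⟨w, hw, rfl⟩
    exact List.sum_nonneg (fun x hx => by
      rcases List.mem_map.mp hx with ⟨c, hc, rfl⟩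
      exact (pv_value_eq c (hW w hw c hc)).2)
  have hs0 : 0 ≤ sval := List.sum_nonneg hnn
  have hble : ∀ b ∈ vals, b ≤ sval := List.single_le_sum hnn
  rw [pv_prime_eq sval sval hs0 le_rfl]
  by_cases hp : (decide (sval > 1) && !((pvComposites sval).contains sval)) = true
  · rw [if_pos hp, if_pos hp]
  · rw [if_neg hp, if_neg hp]
    refine pv_loop_eq sval (pvComposites sval) (W.zip vals) (fun p hp' => ?_)
    have hb : p.2 ∈ vals := (List.of_mem_zip hp').2
    exact pv_prime_eq sval (sval - p.2) (by have := hble p.2 hb; omega)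
      (by have := hnn p.2 hb; omega)

-- ===== VERDICT (by name: the statement is the Claim_ definition above) =====
theorem sentence_primeness_spec : Claim_equal_sentence_primeness := by
  intro txt _
  exact pv_main
    (PySem.Chars.split₀ (txt.toList.map (fun c => if PySem.Chars.isalnum c then c else ' ')))
    (pv_word_chars_alnum txt.toList)
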